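-- pv_equiv track=rewrite | github.com/CemAlpturk/Advent-of-Code | 2023/7/solution.py | hand_combinations
-- ===== SOURCE A (Python) =====
-- def hand_combinations(hand: str) -> list[str]:
--     # Compute all possible hands from the given hand
--     # by replacing the jokers with all possible cards
--     # and return the list of hands
--
--     # Find the number of jokers
--     deck = set("23456789TJQKA")
--     jokers = hand.count("J")
--
--     if jokers == 0:
--         return [hand]
--
--     hands = [hand]
--     for _ in range(jokers):
--         new_hands = []
--         for hand in hands:
--             joker_index = hand.index("J")
--             for card in deck:
--                 new_hands.append(hand[:joker_index] + card + hand[joker_index + 1 :])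
--         hands = new_hands
--
--     return hands
-- ===== SOURCE B (Python) =====
-- def hand_combinations(hand: str) -> list[str]:
--     # Recursive (DFS) expansion instead of A's breadth-first rounds:
--     # expand the first joker with every card, then recurse on the rest.
--     deck = set("23456789TJQKA")
--
--     def go(h: str, k: int) -> list[str]:
--         if k == 0:
--             return [h]
--         i = h.index("J")
--         return [x for c in deck for x in go(h[:i] + c + h[i + 1:], k - 1)]
--
--     return go(hand, hand.count("J"))
-- ===== Notes on version B (the rewrite author's own statement) =====
-- stated objective: alternative
-- what changed: A grows a frontier list through breadth-first rounds (one round per joker, rebuilding the whole hands list each time); B recurses on the joker count, expanding the first joker and descending depth-first, with the k=0 base case yielding [hand].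
import Mathlib
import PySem

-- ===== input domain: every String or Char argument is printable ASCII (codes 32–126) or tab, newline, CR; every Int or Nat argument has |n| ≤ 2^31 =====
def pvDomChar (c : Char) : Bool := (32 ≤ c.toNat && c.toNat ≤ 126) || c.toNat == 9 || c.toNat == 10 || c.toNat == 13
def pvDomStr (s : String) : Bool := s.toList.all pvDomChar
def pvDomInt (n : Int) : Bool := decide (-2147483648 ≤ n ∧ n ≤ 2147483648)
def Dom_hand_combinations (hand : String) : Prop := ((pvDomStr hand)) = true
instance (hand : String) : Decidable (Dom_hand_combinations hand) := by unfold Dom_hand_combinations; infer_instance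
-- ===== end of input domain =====

-- B replaces A's breadth-first rounds over a growing hands list by a direct recursion on the
-- number of jokers (expand the first joker, recurse); same return value, different decomposition.
-- Python iterates over a hash set, so only the SET of returned hands is determined; both ports
-- iterate the deck in 'Set.ofList' (insertion) order.

-- ===== PORT A =====
-- hand[:joker_index] + card + hand[joker_index+1:], with joker_index = hand.index("J")
-- (.index's ValueError is unreachable: A only expands hands still containing "J")
def pvReplA (h : String) (card : Char) : String :=
  let i := PySem.Str.find h "J"
  String.ofList (PySem.Chars.slice h.toList none (some i) ++ [card]
             ++ PySem.Chars.slice h.toList (some (i + 1)) none)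

def hand_combinations (hand : String) : List String :=
  let deck : PySem.Set Char := PySem.Set.ofList "23456789TJQKA".toList
  let jokers := PySem.Str.count hand "J"
  if jokers = 0 then [hand]
  else
    (List.range jokers).foldl
      (fun hands _ =>
        hands.foldl
          (fun new_hands h =>
            deck.foldl (fun acc card => acc ++ [pvReplA h card]) new_hands)
          [])
      [hand]

-- ===== PORT B =====
-- go(h, k): expand the first joker of h with every card of the deck, recurse with k-1
def pvGoB (deck : List Char) (h : String) : Nat → List String
  | 0 => [h]
  | k + 1 =>
    let i := PySem.Str.find h "J"
    deck.flatMap (fun c =>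
      pvGoB deck
        (String.ofList (PySem.Chars.slice h.toList none (some i) ++ [c]
                    ++ PySem.Chars.slice h.toList (some (i + 1)) none)) k)

def hand_combinations_alt (hand : String) : List String :=
  pvGoB (PySem.Set.ofList "23456789TJQKA".toList) hand (PySem.Str.count hand "J")

-- ===== PRECONDITION & SPEC =====
def Spec_hand_combinations (hand : String) (out : List String) : Prop := out = hand_combinations_alt hand
instance (hand : String) (out : List String) : Decidable (Spec_hand_combinations hand out) := by unfold Spec_hand_combinations; infer_instance

-- ===== CLAIM (what is proved, stated in full; the proofs are below) =====
def Claim_equal_hand_combinations : Prop := ∀ (hand : String), Dom_hand_combinations hand → Spec_hand_combinations hand (hand_combinations hand)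

-- ===== LEMMAS AND PROOFS =====

lemma pv_flatMap_singleton_eq_map {α β : Type} (f : α → β) (l : List α) :
    l.flatMap (fun x => [f x]) = l.map f := by
  induction l with
  | nil => rfl
  | cons a t ih => simp only [List.flatMap_cons, List.map_cons, ih]; rfl

-- pvGoB's inline replacement is pvReplA
lemma pvGoB_succ (deck : List Char) (h : String) (k : Nat) :
    pvGoB deck h (k + 1) = deck.flatMap (fun c => pvGoB deck (pvReplA h c) k) := by
  simp [pvGoB, pvReplA]

-- expanding every leaf of a depth-k tree by one level is the depth-(k+1) tree
lemma pvGoB_leaf_expand (deck : List Char) (k : Nat) (h : String) :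
    (pvGoB deck h k).flatMap (fun h' => deck.map (fun c => pvReplA h' c))
      = pvGoB deck h (k + 1) := by
  induction k generalizing h with
  | zero =>
    rw [pvGoB_succ]
    simp only [pvGoB, List.flatMap_cons, List.flatMap_nil, List.append_nil,
      pv_flatMap_singleton_eq_map]
  | succ k ih =>
    rw [pvGoB_succ, pvGoB_succ, List.flatMap_assoc]
    exact List.flatMap_congr (fun c _ => ih (pvReplA h c))

-- A's n breadth-first rounds compute B's depth-n recursion at every hand of the frontier
lemma rounds_eq_flatMap_go (deck : List Char) (n : Nat) (hs : List String) :
    (List.range n).foldl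
        (fun hands _ => hands.flatMap (fun h => deck.map (fun c => pvReplA h c))) hs
      = hs.flatMap (fun h => pvGoB deck h n) := by
  induction n with
  | zero => simp [pvGoB]
  | succ n ih =>
    rw [List.range_succ, List.foldl_append, List.foldl_cons, List.foldl_nil, ih,
        List.flatMap_assoc]
    exact List.flatMap_congr (fun h _ => pvGoB_leaf_expand deck n h)

-- A's two inner accumulator loops are that flatMap of a map
lemma inner_loops_eq (deck : List Char) (hands : List String) :
    hands.foldl
        (fun new_hands h => deck.foldl (fun acc card => acc ++ [pvReplA h card]) new_hands) []
      = hands.flatMap (fun h => deck.map (fun c => pvReplA h c)) := by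
  have : ∀ h new_hands, deck.foldl (fun acc card => acc ++ [pvReplA h card]) new_hands
      = new_hands ++ deck.map (fun c => pvReplA h c) := by
    intro h new_hands
    exact PySem.List.foldl_append_singleton_eq_map (fun card => pvReplA h card) deck new_hands
  simp only [this]
  simpa using PySem.List.foldl_append_eq_flatMap
    (fun h => deck.map (fun c => pvReplA h c)) hands []

-- ===== VERDICT (by name: the statement is the Claim_ definition above) =====
theorem hand_combinations_spec : Claim_equal_hand_combinations := by
  intro hand _
  show hand_combinations hand = hand_combinations_alt hand
  simp only [hand_combinations, hand_combinations_alt]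
  by_cases h0 : PySem.Str.count hand "J" = 0
  · rw [if_pos h0, h0]; rfl
  · rw [if_neg h0]
    have hfun : (fun (hands : List String) (_ : Nat) =>
          hands.foldl
            (fun new_hands h =>
              (PySem.Set.ofList "23456789TJQKA".toList).foldl
                (fun acc card => acc ++ [pvReplA h card]) new_hands) [])
        = fun (hands : List String) (_ : Nat) =>
            hands.flatMap (fun h =>
              (PySem.Set.ofList "23456789TJQKA".toList).map (fun c => pvReplA h c)) := by
      funext hands _
      exact inner_loops_eq _ hands
    rw [hfun, rounds_eq_flatMap_go]
    simp
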